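-- pv_equiv track=rewrite | github.com/ducami-org/ducami-org-Algorithm | codeup1272.py | getCurrentMoney
-- ===== SOURCE A (Python) =====
-- def getCurrentMoney(n):
--     currentMoney = 0
--     for i in range(1, n+1):
--         if i % 2 == 0:
--             currentMoney = int(i / 2) * 10
--         else:
--             currentMoney = int(i / 2) + 1
--     return currentMoney
-- ===== SOURCE B (Python) =====
-- def getCurrentMoney(n):
--     # Closed form: the loop only keeps the value computed at the last i (= n).
--     if n < 1:
--         return 0
--     return (n // 2) * 10 if n % 2 == 0 else n // 2 + 1
-- ===== Notes on version B (the rewrite author's own statement) =====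
-- stated objective: simpler
-- what changed: Replaces the 1..n loop (whose body ignores the accumulator) with the closed form evaluated at the last iteration index.
import Mathlib
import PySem

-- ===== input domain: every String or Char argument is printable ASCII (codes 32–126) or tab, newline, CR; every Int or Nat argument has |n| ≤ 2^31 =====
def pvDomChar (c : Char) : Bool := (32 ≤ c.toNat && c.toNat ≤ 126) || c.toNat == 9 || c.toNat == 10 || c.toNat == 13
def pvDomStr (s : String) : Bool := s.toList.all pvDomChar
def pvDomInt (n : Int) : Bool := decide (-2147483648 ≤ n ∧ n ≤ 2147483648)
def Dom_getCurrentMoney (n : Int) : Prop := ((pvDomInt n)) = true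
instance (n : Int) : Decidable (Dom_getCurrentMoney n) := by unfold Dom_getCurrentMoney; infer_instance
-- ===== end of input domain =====

-- B replaces A's 1..n loop (whose body ignores the accumulator) with the closed form at i = n; simpler and O(1).

-- ===== PORT A =====
-- int(i / 2): for i ≥ 1 (as in range(1, n+1)) truncation toward zero equals floor division,
-- and i/2 is exact in float for |i| ≤ 2^31, so PySem.Int.floordiv i 2 is exact here.
def getCurrentMoney (n : Int) : Int :=
  (PySem.List.pyRange 1 (n + 1) 1).foldl
    (fun _currentMoney i =>
      if PySem.Int.mod i 2 = 0 then (PySem.Int.floordiv i 2) * 10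
      else PySem.Int.floordiv i 2 + 1) 0

-- ===== PORT B =====
def getCurrentMoney_alt (n : Int) : Int :=
  if n < 1 then 0
  else if PySem.Int.mod n 2 = 0 then (PySem.Int.floordiv n 2) * 10
  else PySem.Int.floordiv n 2 + 1

-- ===== PRECONDITION & SPEC =====
def Spec_getCurrentMoney (n : Int) (out : Int) : Prop := out = getCurrentMoney_alt n
instance (n : Int) (out : Int) : Decidable (Spec_getCurrentMoney n out) := by unfold Spec_getCurrentMoney; infer_instance

-- ===== CLAIM (what is proved, stated in full; the proofs are below) =====
def Claim_equal_getCurrentMoney : Prop := ∀ (n : Int), Dom_getCurrentMoney n → Spec_getCurrentMoney n (getCurrentMoney n)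

-- ===== LEMMAS AND PROOFS =====
-- A's loop body ignores the accumulator, so folding over l ++ [x] yields f x.
theorem pv_foldl_const_last (f : Int → Int) (l : List Int) (acc x : Int) :
    (l ++ [x]).foldl (fun _ i => f i) acc = f x := by
  simp [List.foldl_append]

-- ===== VERDICT (by name: the statement is the Claim_ definition above) =====
theorem getCurrentMoney_spec : Claim_equal_getCurrentMoney := by
  intro n _
  unfold Spec_getCurrentMoney getCurrentMoney getCurrentMoney_alt
  by_cases h : n < 1
  · rw [PySem.List.pyRange_one_eq_nil (by omega)]
    simp [h]
  · rw [PySem.List.pyRange_one_succ_right (by omega)]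
    rw [pv_foldl_const_last (fun i => if PySem.Int.mod i 2 = 0 then (PySem.Int.floordiv i 2) * 10 else PySem.Int.floordiv i 2 + 1)]
    simp [h]
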